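-- pv_equiv track=rewrite | github.com/TittiSmile/Python_exercises_coursera | 14-more about iterations/14.8.6.py | beginning
-- ===== SOURCE A (Python) =====
-- def beginning(str_lst):
--     new_lst = []
--     i = 0
--     while i < len(str_lst):
--         if str_lst[i] == "bye":
--             break
--         elif str_lst[i] != "bye" and len(new_lst) < 10:
--             new_lst.append(str_lst[i])
--         i+=1
--     return new_lst
-- ===== SOURCE B (Python) =====
-- def beginning(str_lst):
--     idx = str_lst.index("bye") if "bye" in str_lst else len(str_lst)
--     return str_lst[:min(idx, 10)]
-- ===== Notes on version B (the rewrite author's own statement) =====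
-- stated objective: simpler
-- what changed: Replaced the index-while loop with explicit append accumulation by locating the 'bye' boundary once (list.index / len) and returning a single slice capped at 10; one C-level slice replaces the per-item append loop.
import Mathlib
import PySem

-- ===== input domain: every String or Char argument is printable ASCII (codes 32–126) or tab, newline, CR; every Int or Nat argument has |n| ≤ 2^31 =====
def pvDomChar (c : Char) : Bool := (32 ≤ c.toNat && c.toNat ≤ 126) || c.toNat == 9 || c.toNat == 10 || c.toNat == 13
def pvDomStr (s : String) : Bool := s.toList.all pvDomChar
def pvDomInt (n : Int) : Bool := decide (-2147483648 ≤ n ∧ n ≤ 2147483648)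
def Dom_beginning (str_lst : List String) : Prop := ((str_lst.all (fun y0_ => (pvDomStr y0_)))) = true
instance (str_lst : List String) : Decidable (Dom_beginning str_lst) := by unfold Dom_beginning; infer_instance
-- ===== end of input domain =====

-- B replaces A's index-while loop with conditional appends by a one-shot boundary find ("bye" index or length) plus a single slice capped at 10: simpler.

-- ===== PORT A =====
-- A's while loop over index i with accumulator new_lst, transcribed as structural
-- recursion over the remaining suffix with the same accumulator and branch order.
def beginningGo (acc : List String) : List String → List String
  | [] => acc
  | x :: xs =>
    if x = "bye" then acc
    else if x ≠ "bye" ∧ acc.length < 10 then beginningGo (acc ++ [x]) xs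
    else beginningGo acc xs

def beginning (str_lst : List String) : List String := beginningGo [] str_lst

-- ===== PORT B =====
def beginning_alt (str_lst : List String) : List String :=
  let idx : Nat := (PySem.List.index? str_lst "bye").getD str_lst.length
  PySem.List.slice str_lst none (some ((min idx 10 : Nat) : Int))

-- ===== PRECONDITION & SPEC =====
def Spec_beginning (str_lst : List String) (out : List String) : Prop := out = beginning_alt str_lst
instance (str_lst : List String) (out : List String) : Decidable (Spec_beginning str_lst out) := by unfold Spec_beginning; infer_instance

-- ===== CLAIM (what is proved, stated in full; the proofs are below) =====
def Claim_equal_beginning : Prop := ∀ (str_lst : List String), Dom_beginning str_lst → Spec_beginning str_lst (beginning str_lst)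

-- ===== LEMMAS AND PROOFS =====

theorem beginningGo_eq (xs : List String) : ∀ (acc : List String),
    beginningGo acc xs = acc ++ (xs.takeWhile (fun x => x ≠ "bye")).take (10 - acc.length) := by
  induction xs with
  | nil => intro acc; simp [beginningGo]
  | cons x xs ih =>
    intro acc
    by_cases hx : x = "bye"
    · simp [beginningGo, hx]
    · by_cases hl : acc.length < 10
      · rw [beginningGo]
        simp only [hx, hl, and_true, ih]
        have h10 : 10 - acc.length = (10 - (acc.length + 1)) + 1 := by omega
        simp [hx, h10, List.take_succ_cons]
      · rw [beginningGo]
        simp only [hx, hl, ih]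
        have h10 : 10 - acc.length = 0 := by omega
        simp [h10]

theorem idx_take (l : List String) : ∀ (n : Nat),
    l.take (min ((PySem.List.index? l "bye").getD l.length) n)
      = (l.takeWhile (fun x => x ≠ "bye")).take n := by
  induction l with
  | nil => intro n; simp
  | cons x xs ih =>
    intro n
    by_cases hx : x = "bye"
    · subst hx; rw [PySem.List.index?_cons_self]; simp
    · rw [PySem.List.index?_cons_of_ne xs hx]
      have hgetD : ((PySem.List.index? xs "bye").map (· + 1)).getD (x :: xs).length
          = (PySem.List.index? xs "bye").getD xs.length + 1 := by
        cases PySem.List.index? xs "bye" <;> simp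
      rw [hgetD]
      cases n with
      | zero => simp
      | succ m =>
        have hmin : min ((PySem.List.index? xs "bye").getD xs.length + 1) (m + 1)
            = min ((PySem.List.index? xs "bye").getD xs.length) m + 1 := by omega
        have ih' := ih m
        simp at ih'
        simp [hmin, hx, List.take_succ_cons, ih']

-- ===== VERDICT (by name: the statement is the Claim_ definition above) =====
theorem beginning_spec : Claim_equal_beginning := by
  intro l _
  unfold Spec_beginning beginning beginning_alt
  rw [beginningGo_eq, PySem.List.slice_to_natCast]
  simpa using (idx_take l 10).symm
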